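-- pv_equiv track=rewrite | github.com/Dyronix/py-asm-debugger | core/instructions.py | _extern_matches_symbol
-- ===== SOURCE A (Python) =====
-- def _normalize_symbol(name: str) -> str:
--     return "".join(name.split())
--
-- def _extern_matches_symbol(name: str, externs: set[str]) -> bool:
--     normalized_externs = {_normalize_symbol(sym) for sym in externs}
--     normalized_externs |= {_normalize_symbol(sym.lstrip("_")) for sym in externs}
--     candidates = {
--         name,
--         name.split("@", 1)[0],
--         name.lstrip("_"),
--         _normalize_symbol(name),
--         _normalize_symbol(name.split("@", 1)[0]),
--         _normalize_symbol(name.lstrip("_")),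
--     }
--     return any(candidate in normalized_externs for candidate in candidates)
-- ===== SOURCE B (Python) =====
-- def _extern_matches_symbol(name: str, externs: set[str]) -> bool:
--     base = name.split("@", 1)[0]
--     stripped = name.lstrip("_")
--     for sym in externs:
--         for target in (sym, sym.lstrip("_")):
--             for cand in (name, base, stripped):
--                 if _eq_skip_right(cand, target) or _eq_skip_both(cand, target):
--                     return True
--     return False
--
--
-- def _eq_skip_right(cand: str, sym: str) -> bool:
--     # cand == sym-with-all-whitespace-removed, streamed char by char (no string built)
--     i = 0
--     for ch in sym:
--         if ch.isspace():
--             continue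
--         if i >= len(cand) or cand[i] != ch:
--             return False
--         i += 1
--     return i == len(cand)
--
--
-- def _eq_skip_both(cand: str, sym: str) -> bool:
--     # whitespace-removed cand == whitespace-removed sym, streamed from both sides
--     it = (ch for ch in sym if not ch.isspace())
--     for x in cand:
--         if x.isspace():
--             continue
--         if next(it, None) != x:
--             return False
--     return next(it, None) is None
-- ===== Notes on version B (the rewrite author's own statement) =====
-- stated objective: alternative
-- what changed: A materializes the set of all normalized externs and a six-candidate set and intersects them; B builds no sets and no normalized strings at all: it streams each extern (and its underscore-stripped form) character by character against the three raw name forms with whitespace skipped on one or both sides, returning on the first match.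
import Mathlib
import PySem

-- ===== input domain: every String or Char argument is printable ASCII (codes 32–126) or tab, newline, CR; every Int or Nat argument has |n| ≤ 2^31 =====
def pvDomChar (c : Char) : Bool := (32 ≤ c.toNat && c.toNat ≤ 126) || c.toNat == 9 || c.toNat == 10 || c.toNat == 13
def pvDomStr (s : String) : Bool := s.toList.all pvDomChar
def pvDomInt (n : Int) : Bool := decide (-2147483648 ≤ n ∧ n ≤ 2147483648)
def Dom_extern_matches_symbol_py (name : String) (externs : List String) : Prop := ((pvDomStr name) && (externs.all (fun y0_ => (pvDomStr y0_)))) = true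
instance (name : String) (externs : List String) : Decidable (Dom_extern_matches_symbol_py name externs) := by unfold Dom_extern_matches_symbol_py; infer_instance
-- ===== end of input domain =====

-- B replaces A's set intersection (materialize all normalized externs, then test six candidate
-- strings for membership) by streamed character-level comparisons: per extern it compares the three
-- raw name forms against the extern with whitespace skipped on one or both sides, never building a
-- normalized string or a set (objective: alternative).


-- ===== PORT A =====
-- _normalize_symbol: "".join(name.split())
def pvNormalizeSymbol (name : String) : String :=
  PySem.Str.join "" (PySem.Str.split₀ name)

-- s.lstrip("_") — ported by hand: drops exactly the leading '_' characters (exact)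
def pvLstripUnderscore (s : String) : String :=
  String.ofList (s.toList.dropWhile (· == '_'))

-- s.split("@", 1)[0] — ported by hand: the prefix before the first '@' (the whole string if none); exact
def pvBeforeAt (s : String) : String :=
  String.ofList (s.toList.takeWhile (· != '@'))

def extern_matches_symbol_py (name : String) (externs : List String) : Bool :=
  let normalizedExterns : PySem.Set String :=
    PySem.Set.union
      (PySem.Set.ofList (externs.map (fun sym => pvNormalizeSymbol sym)))
      (PySem.Set.ofList (externs.map (fun sym => pvNormalizeSymbol (pvLstripUnderscore sym))))
  let candidates : PySem.Set String :=
    PySem.Set.ofList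
      [ name,
        pvBeforeAt name,
        pvLstripUnderscore name,
        pvNormalizeSymbol name,
        pvNormalizeSymbol (pvBeforeAt name),
        pvNormalizeSymbol (pvLstripUnderscore name) ]
  candidates.any (fun candidate => PySem.Set.contains normalizedExterns candidate)

-- ===== PORT B =====
-- _eq_skip_right: cand == sym-with-whitespace-removed, streamed over sym
-- (the Python index i / the rest cand[i:] is the remaining cand list)
def pvEqSkipR : List Char → List Char → Bool
  | cand, [] => cand.isEmpty
  | cand, ch :: rest =>
    if PySem.Chars.isspace ch then pvEqSkipR cand rest
    else
      match cand with
      | [] => false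
      | x :: xs => if x == ch then pvEqSkipR xs rest else false

-- _eq_skip_both: whitespace-removed cand == whitespace-removed sym; the generator's state is the
-- remaining sym list, next(it, None) = head of (sym.dropWhile isspace)
def pvEqSkipB : List Char → List Char → Bool
  | [], sym => (sym.dropWhile PySem.Chars.isspace).isEmpty
  | x :: xs, sym =>
    if PySem.Chars.isspace x then pvEqSkipB xs sym
    else
      match sym.dropWhile PySem.Chars.isspace with
      | [] => false
      | ch :: rest => if ch == x then pvEqSkipB xs rest else false

-- the triple loop over externs / the two targets / the three candidates, with early return
def pvScanB (cands : List (List Char)) : List String → Bool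
  | [] => false
  | sym :: restExterns =>
    let t1 := sym.toList
    if [t1, t1.dropWhile (· == '_')].any (fun t =>
         cands.any (fun c => pvEqSkipR c t || pvEqSkipB c t)) then true
    else pvScanB cands restExterns

def extern_matches_symbol_py_alt (name : String) (externs : List String) : Bool :=
  let n := name.toList
  let base := n.takeWhile (· != '@')
  let stripped := n.dropWhile (· == '_')
  pvScanB [n, base, stripped] externs

-- ===== PRECONDITION & SPEC =====
def Spec_extern_matches_symbol_py (name : String) (externs : List String) (out : Bool) : Prop := out = extern_matches_symbol_py_alt name externs
instance (name : String) (externs : List String) (out : Bool) : Decidable (Spec_extern_matches_symbol_py name externs out) := by unfold Spec_extern_matches_symbol_py; infer_instance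

-- ===== CLAIM (what is proved, stated in full; the proofs are below) =====
def Claim_equal_extern_matches_symbol_py : Prop := ∀ (name : String) (externs : List String), Dom_extern_matches_symbol_py name externs → Spec_extern_matches_symbol_py name externs (extern_matches_symbol_py name externs)

-- ===== LEMMAS AND PROOFS =====

-- whitespace-removal of a string, at the List Char level (the common value both sides compute)
def pvNormL (l : List Char) : List Char := l.filter (fun c => !PySem.Chars.isspace c)

lemma pvSplitGo_flatten (s cur : List Char) (acc : List (List Char)) :
    (PySem.Chars.split₀.go s cur acc).flatten =
      acc.reverse.flatten ++ cur.reverse ++ s.filter (fun c => !PySem.Chars.isspace c) := by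
  induction s generalizing cur acc with
  | nil =>
      by_cases h : cur = [] <;> simp [PySem.Chars.split₀.go, h]
  | cons c rest ih =>
      by_cases hws : PySem.Chars.isspace c
      · by_cases h : cur = [] <;> simp [PySem.Chars.split₀.go, hws, h, ih]
      · simp [PySem.Chars.split₀.go, hws, ih]

lemma pvFlatten_intersperse_nil {α : Type} (l : List (List α)) :
    (List.intersperse [] l).flatten = l.flatten := by
  induction l with
  | nil => rfl
  | cons a t ih =>
      cases t with
      | nil => rfl
      | cons b t' => simpa [List.intersperse] using ih

lemma pvNorm_toList (s : String) :
    (pvNormalizeSymbol s).toList = pvNormL s.toList := by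
  simp [pvNormalizeSymbol, PySem.Str.join, PySem.Str.split₀, PySem.Chars.join,
    PySem.Chars.split₀, List.intercalate, pvFlatten_intersperse_nil, Function.comp_def,
    pvSplitGo_flatten, pvNormL]

lemma pvEqSkipR_iff (cand sym : List Char) :
    pvEqSkipR cand sym = true ↔ cand = sym.filter (fun c => !PySem.Chars.isspace c) := by
  induction sym generalizing cand with
  | nil => cases cand <;> simp [pvEqSkipR]
  | cons ch rest ih =>
      by_cases hws : PySem.Chars.isspace ch
      · simpa [pvEqSkipR, hws] using ih cand
      · cases cand with
        | nil => simp [pvEqSkipR, hws]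
        | cons x xs =>
            by_cases hx : x = ch
            · simp [pvEqSkipR, hws, hx, ih]
            · simp [pvEqSkipR, hws, hx]

lemma pvFilter_dropWhile (sym : List Char) :
    sym.filter (fun c => !PySem.Chars.isspace c) =
      (sym.dropWhile PySem.Chars.isspace).filter (fun c => !PySem.Chars.isspace c) := by
  induction sym with
  | nil => rfl
  | cons c rest ih =>
      by_cases h : PySem.Chars.isspace c <;> simp [List.dropWhile, List.filter, h, ih]

lemma pvDropWhile_head {α : Type} (p : α → Bool) (l : List α) (ch : α) (rest : List α)
    (h : l.dropWhile p = ch :: rest) : p ch = false := by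
  induction l with
  | nil => simp at h
  | cons a t ih =>
      by_cases ha : p a
      · exact ih (by simpa [List.dropWhile, ha] using h)
      · simp only [List.dropWhile, ha] at h
        injection h with h1 h2
        subst h1
        simpa using ha

lemma pvEqSkipB_iff (cand sym : List Char) :
    pvEqSkipB cand sym = true ↔
      cand.filter (fun c => !PySem.Chars.isspace c) = sym.filter (fun c => !PySem.Chars.isspace c) := by
  induction cand generalizing sym with
  | nil =>
      rw [pvFilter_dropWhile sym]
      cases h : sym.dropWhile PySem.Chars.isspace with
      | nil => simp [pvEqSkipB, h]
      | cons ch rest =>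
          have hch := pvDropWhile_head _ _ _ _ h
          simp [pvEqSkipB, h, List.filter, hch]
  | cons x xs ih =>
      by_cases hx : PySem.Chars.isspace x
      · simpa [pvEqSkipB, hx, List.filter] using ih sym
      · rw [pvFilter_dropWhile sym]
        cases h : sym.dropWhile PySem.Chars.isspace with
        | nil => simp [pvEqSkipB, h, List.filter, hx]
        | cons ch rest =>
            have hch := pvDropWhile_head _ _ _ _ h
            by_cases hxc : ch = x
            · simp [pvEqSkipB, h, hx, hxc, List.filter, ih]
            · simp [pvEqSkipB, h, hx, hxc, List.filter, hch, Ne.symm hxc]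

lemma pvScanB_iff (cands : List (List Char)) (externs : List String) :
    pvScanB cands externs = true ↔
      ∃ sym ∈ externs, ∃ t ∈ [sym.toList, sym.toList.dropWhile (· == '_')],
        ∃ c ∈ cands, (c = pvNormL t ∨ pvNormL c = pvNormL t) := by
  induction externs with
  | nil => simp [pvScanB]
  | cons sym rest ih =>
      simp only [pvScanB]
      split_ifs with h
      · simp only [List.any_eq_true, Bool.or_eq_true, pvEqSkipR_iff, pvEqSkipB_iff] at h
        obtain ⟨t, ht, c, hc, hor⟩ := h
        simp only [true_iff]
        exact ⟨sym, by simp, t, ht, c, hc, by simpa [pvNormL] using hor⟩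
      · simp only [List.any_eq_true, Bool.or_eq_true, pvEqSkipR_iff, pvEqSkipB_iff] at h
        rw [ih]
        constructor
        · rintro ⟨s, hs, t, ht, c, hc, hor⟩
          exact ⟨s, List.mem_cons_of_mem _ hs, t, ht, c, hc, hor⟩
        · rintro ⟨s, hs, t, ht, c, hc, hor⟩
          rcases List.mem_cons.mp hs with rfl | hs
          · exact absurd ⟨t, ht, c, hc, by simpa [pvNormL] using hor⟩ h
          · exact ⟨s, hs, t, ht, c, hc, hor⟩

lemma pvA_iff (name : String) (externs : List String) :
    extern_matches_symbol_py name externs = true ↔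
      ∃ c ∈ [ name, pvBeforeAt name, pvLstripUnderscore name, pvNormalizeSymbol name,
              pvNormalizeSymbol (pvBeforeAt name), pvNormalizeSymbol (pvLstripUnderscore name) ],
        ∃ sym ∈ externs, c = pvNormalizeSymbol sym ∨ c = pvNormalizeSymbol (pvLstripUnderscore sym) := by
  simp only [extern_matches_symbol_py, List.any_eq_true, PySem.Set.contains_iff,
    PySem.Set.mem_union, PySem.Set.mem_ofList, List.mem_map]
  constructor
  · rintro ⟨c, hc, h⟩
    refine ⟨c, hc, ?_⟩
    rcases h with ⟨s, hs, rfl⟩ | ⟨s, hs, rfl⟩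
    · exact ⟨s, hs, Or.inl rfl⟩
    · exact ⟨s, hs, Or.inr rfl⟩
  · rintro ⟨c, hc, s, hs, h⟩
    refine ⟨c, hc, ?_⟩
    rcases h with rfl | rfl
    · exact Or.inl ⟨s, hs, rfl⟩
    · exact Or.inr ⟨s, hs, rfl⟩

lemma pvLstrip_toList (s : String) :
    (pvLstripUnderscore s).toList = s.toList.dropWhile (· == '_') := by
  simp [pvLstripUnderscore]

lemma pvBeforeAt_toList (s : String) :
    (pvBeforeAt s).toList = s.toList.takeWhile (· != '@') := by
  simp [pvBeforeAt]

lemma pvEqNorm_iff (r s : String) :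
    r = pvNormalizeSymbol s ↔ r.toList = pvNormL s.toList := by
  rw [← String.toList_inj, pvNorm_toList]

set_option maxHeartbeats 1000000 in
-- ===== VERDICT (by name: the statement is the Claim_ definition above) =====
theorem extern_matches_symbol_py_spec : Claim_equal_extern_matches_symbol_py := by
  intro name externs _
  show extern_matches_symbol_py name externs = extern_matches_symbol_py_alt name externs
  rw [Bool.eq_iff_iff, pvA_iff]
  simp only [extern_matches_symbol_py_alt, pvScanB_iff, List.mem_cons, List.not_mem_nil,
    or_false, exists_eq_or_imp, exists_eq_left]
  simp only [pvEqNorm_iff, pvNorm_toList, pvLstrip_toList, pvBeforeAt_toList]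
  constructor
  · rintro (⟨s, hs, h⟩ | ⟨s, hs, h⟩ | ⟨s, hs, h⟩ | ⟨s, hs, h⟩ | ⟨s, hs, h⟩ | ⟨s, hs, h⟩) <;>
      exact ⟨s, hs, by tauto⟩
  · rintro ⟨s, hs, ((h | h) | (h | h) | h | h) | ((h | h) | (h | h) | h | h)⟩ <;>
      first
        | exact Or.inl ⟨s, hs, Or.inl h⟩
        | exact Or.inl ⟨s, hs, Or.inr h⟩
        | exact Or.inr (Or.inl ⟨s, hs, Or.inl h⟩)
        | exact Or.inr (Or.inl ⟨s, hs, Or.inr h⟩)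
        | exact Or.inr (Or.inr (Or.inl ⟨s, hs, Or.inl h⟩))
        | exact Or.inr (Or.inr (Or.inl ⟨s, hs, Or.inr h⟩))
        | exact Or.inr (Or.inr (Or.inr (Or.inl ⟨s, hs, Or.inl h⟩)))
        | exact Or.inr (Or.inr (Or.inr (Or.inl ⟨s, hs, Or.inr h⟩)))
        | exact Or.inr (Or.inr (Or.inr (Or.inr (Or.inl ⟨s, hs, Or.inl h⟩))))
        | exact Or.inr (Or.inr (Or.inr (Or.inr (Or.inl ⟨s, hs, Or.inr h⟩))))
        | exact Or.inr (Or.inr (Or.inr (Or.inr (Or.inr ⟨s, hs, Or.inl h⟩))))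
        | exact Or.inr (Or.inr (Or.inr (Or.inr (Or.inr ⟨s, hs, Or.inr h⟩))))
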